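-- pv_equiv track=rewrite | github.com/lotuspeach/python-challenge | PyPoll/main.py | getDuplicatesWithCount
-- ===== SOURCE A (Python) =====
-- def getDuplicatesWithCount(Candidates):
--     dictofCandidates = dict()
--     for name in Candidates:
--         if name in dictofCandidates:
--             dictofCandidates[name] += 1
--         else:
--             dictofCandidates[name] = 1
--
--     dictofCandidates = { key:value for key, value in dictofCandidates.items() if value > 1}
--     return dictofCandidates
-- ===== SOURCE B (Python) =====
-- def getDuplicatesWithCount(Candidates):
--     result = {}
--     seen = set()
--     for name in Candidates:
--         if name not in seen:
--             seen.add(name)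
--             count = Candidates.count(name)
--             if count > 1:
--                 result[name] = count
--     return result
-- ===== Notes on version B (the rewrite author's own statement) =====
-- stated objective: alternative
-- what changed: Instead of building an incrementing counter dict and then filtering it, B walks the list once per distinct name (tracked by a seen-set) and computes each name's total with list.count, inserting it directly if it exceeds 1.
import Mathlib
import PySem

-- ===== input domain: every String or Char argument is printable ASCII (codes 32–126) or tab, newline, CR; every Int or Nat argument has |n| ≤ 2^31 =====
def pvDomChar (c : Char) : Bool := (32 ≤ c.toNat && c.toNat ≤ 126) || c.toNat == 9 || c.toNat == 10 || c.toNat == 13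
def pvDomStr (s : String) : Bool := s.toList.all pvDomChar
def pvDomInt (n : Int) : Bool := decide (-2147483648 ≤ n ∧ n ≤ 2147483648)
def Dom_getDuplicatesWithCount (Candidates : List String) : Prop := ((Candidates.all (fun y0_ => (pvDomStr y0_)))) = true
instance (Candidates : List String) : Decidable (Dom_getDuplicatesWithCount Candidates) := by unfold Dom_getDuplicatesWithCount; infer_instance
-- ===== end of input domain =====

-- B replaces A's incrementing counter-dict with a seen-set plus a per-distinct-name list.count scan (alternative decomposition, same results).


-- ===== PORT A =====
-- 'd[name] += 1' is guarded by 'name in d', so the read is 'd.getD name 0' (exact here).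
def getDuplicatesWithCount (Candidates : List String) : List (String × Int) :=
  let d := Candidates.foldl
    (fun (d : PySem.Dict String Int) name =>
      if d.contains name then d.insert name (d.getD name 0 + 1)
      else d.insert name 1)
    PySem.Dict.empty
  -- the dict comprehension: keep the items with value > 1, rebuild a dict
  (PySem.Dict.ofList (d.items.filter (fun kv => 1 < kv.2))).items

-- ===== PORT B =====
-- 'name' is never already in 'result' (guarded by 'seen'), so the dict insert appends (exact here).
def getDuplicatesWithCountGo (C : List String) : List String → PySem.Set String → List (String × Int)
  | [], _ => []
  | name :: rest, seen =>
    if PySem.Set.contains seen name then getDuplicatesWithCountGo C rest seen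
    else
      let count : Int := (PySem.List.count C name : Int)
      (if 1 < count then [(name, count)] else []) ++
        getDuplicatesWithCountGo C rest (PySem.Set.add seen name)

def getDuplicatesWithCount_alt (Candidates : List String) : List (String × Int) :=
  getDuplicatesWithCountGo Candidates Candidates PySem.Set.empty

-- ===== PRECONDITION & SPEC =====
def Spec_getDuplicatesWithCount (Candidates : List String) (out : List (String × Int)) : Prop := out = getDuplicatesWithCount_alt Candidates
instance (Candidates : List String) (out : List (String × Int)) : Decidable (Spec_getDuplicatesWithCount Candidates out) := by unfold Spec_getDuplicatesWithCount; infer_instance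

-- ===== CLAIM (what is proved, stated in full; the proofs are below) =====
def Claim_equal_getDuplicatesWithCount : Prop := ∀ (Candidates : List String), Dom_getDuplicatesWithCount Candidates → Spec_getDuplicatesWithCount Candidates (getDuplicatesWithCount Candidates)

-- ===== LEMMAS AND PROOFS =====

-- A's loop body is extensionally the 'insert (getD + 1)' counter step.
theorem pv_stepA_eq :
    (fun (d : PySem.Dict String Int) (name : String) =>
      if d.contains name then d.insert name (d.getD name 0 + 1) else d.insert name 1)
    = (fun (d : PySem.Dict String Int) name => d.insert name (d.getD name 0 + 1)) := by
  funext d name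
  by_cases h : d.contains name = true
  · simp [h]
  · simp only [Bool.not_eq_true] at h
    simp [h, PySem.Dict.getD_of_not_contains d (0 : Int) h]

-- A computes: distinct names in first-occurrence order, paired with their counts, kept if count > 1.
theorem pv_A_eq (C : List String) :
    getDuplicatesWithCount C
      = ((PySem.Set.ofList C).map (fun k => (k, (C.count k : Int)))).filter
          (fun kv => 1 < kv.2) := by
  unfold getDuplicatesWithCount
  simp only [pv_stepA_eq, PySem.Dict.foldl_insert_getD_add_one_eq_counter,
    PySem.Dict.items_counter]
  set l := ((PySem.Set.ofList C).map (fun k => (k, (C.count k : Int)))).filter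
      (fun kv => decide (1 < kv.2)) with hl
  have hmap : ((PySem.Set.ofList C).map (fun k => (k, (C.count k : Int)))).map (·.1)
      = PySem.Set.ofList C := by simp [Function.comp_def]
  have hbig : (((PySem.Set.ofList C).map (fun k => (k, (C.count k : Int)))).map (·.1)).Nodup := by
    rw [hmap]; exact PySem.Set.nodup_ofList C
  have hsub : (l.map (·.1)).Sublist
      (((PySem.Set.ofList C).map (fun k => (k, (C.count k : Int)))).map (·.1)) := by
    rw [hl]; exact List.Sublist.map _ List.filter_sublist
  have hnd : (l.map (·.1)).Nodup := hbig.sublist hsub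
  have := PySem.Dict.items_foldl_insert_fresh (l := l) (k := (·.1)) (v := (·.2))
    (d := PySem.Dict.empty) (by simp [PySem.Dict.contains_empty]) (by simpa using hnd)
  simpa [PySem.Dict.ofList, PySem.Dict.update, PySem.Dict.items] using this

-- B computes the same list, with 'seen' filtering out already-emitted names.
theorem pv_go_eq (C : List String) :
    ∀ (xs : List String) (seen : PySem.Set String),
      getDuplicatesWithCountGo C xs seen
        = (((PySem.Set.ofList xs).filter (fun y => !(PySem.Set.contains seen y))).map
            (fun k => (k, (C.count k : Int)))).filter (fun kv => 1 < kv.2) := by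
  intro xs
  induction xs with
  | nil => intro seen; simp [getDuplicatesWithCountGo]
  | cons x xs ih =>
    intro seen
    rw [PySem.Set.ofList_cons]
    have hdis : (PySem.Set.ofList xs).discard x = (PySem.Set.ofList xs).filter (fun y => y != x) := rfl
    by_cases hx : PySem.Set.contains seen x = true
    · rw [getDuplicatesWithCountGo]
      simp only [hx, if_true, hdis, List.filter_cons, Bool.not_true, Bool.false_eq_true, if_false]
      rw [ih seen, List.filter_filter]
      congr 2
      apply List.filter_congr
      intro y _
      by_cases hy : y = x
      · subst hy
        simp [PySem.Set.contains_eq_listContains] at hx ⊢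
        simp [hx]
      · simp [hy]
    · simp only [Bool.not_eq_true] at hx
      have hadd : PySem.Set.add seen x = seen ++ [x] := PySem.Set.add_of_not_mem
        (by simpa [PySem.Set.contains_eq_listContains] using hx)
      have hpred : ((PySem.Set.ofList xs).filter
            (fun y => !(PySem.Set.contains seen y) && (y != x)))
          = (PySem.Set.ofList xs).filter
            (fun y => !(PySem.Set.contains (PySem.Set.add seen x) y)) := by
        apply List.filter_congr
        intro y _
        by_cases hy : y = x
        · subst hy; simp [hadd, PySem.Set.contains_eq_listContains]
        · simp [hy, hadd, PySem.Set.contains_eq_listContains]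
      rw [getDuplicatesWithCountGo]
      rw [ih (PySem.Set.add seen x)]
      simp only [hx, Bool.false_eq_true, if_false, hdis, List.filter_cons, Bool.not_false,
        if_true, List.map_cons, List.filter_filter]
      rw [hpred]
      by_cases hc : (1 : Int) < List.count x C
      · simp [hc, PySem.List.count_eq]
      · simp [hc, PySem.List.count_eq]

-- ===== VERDICT (by name: the statement is the Claim_ definition above) =====
theorem getDuplicatesWithCount_spec : Claim_equal_getDuplicatesWithCount := by
  intro C _
  unfold Spec_getDuplicatesWithCount getDuplicatesWithCount_alt
  rw [pv_A_eq, pv_go_eq]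
  have h : List.filter (fun y => !(PySem.Set.contains PySem.Set.empty y)) (PySem.Set.ofList C)
      = PySem.Set.ofList C :=
    List.filter_eq_self.mpr
      (fun y _ => by simp [PySem.Set.empty, PySem.Set.contains_eq_listContains])
  rw [h]
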